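-- pv_equiv track=rewrite | github.com/adityatripathi676/password-strength-analyzer | backend/features.py | count_repeated_chars
-- ===== SOURCE A (Python) =====
-- def count_repeated_chars(password: str) -> int:
--     """Count run-length compression savings (aaa → 3 chars saved)."""
--     count = 0
--     i = 0
--     while i < len(password):
--         j = i
--         while j < len(password) and password[j] == password[i]:
--             j += 1
--         run = j - i
--         if run >= 3:
--             count += run - 1  # characters wasted by repetition
--         i = j
--     return count
-- ===== SOURCE B (Python) =====
-- def count_repeated_chars(password: str) -> int:
--     """Local-window counting: a pair (i, i+1) of equal chars is 'wasted' exactly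
--     when it belongs to a run of length >= 3, i.e. when it has an equal neighbour
--     pair on either side.  No runs are ever computed: just count such indices."""
--     n = len(password)
--     return sum(
--         1
--         for i in range(n - 1)
--         if password[i] == password[i + 1]
--         and ((i > 0 and password[i - 1] == password[i])
--              or (i + 2 < n and password[i + 1] == password[i + 2]))
--     )
-- ===== Notes on version B (the rewrite author's own statement) =====
-- stated objective: alternative
-- what changed: Replaces the two-pointer run-finding-and-summing with a run-free local test: count indices i where chars i,i+1 are equal and that pair has an equal neighbouring pair (a pair is wasted iff it lies in a run of length >= 3), summed in one generator comprehension.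
import Mathlib
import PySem

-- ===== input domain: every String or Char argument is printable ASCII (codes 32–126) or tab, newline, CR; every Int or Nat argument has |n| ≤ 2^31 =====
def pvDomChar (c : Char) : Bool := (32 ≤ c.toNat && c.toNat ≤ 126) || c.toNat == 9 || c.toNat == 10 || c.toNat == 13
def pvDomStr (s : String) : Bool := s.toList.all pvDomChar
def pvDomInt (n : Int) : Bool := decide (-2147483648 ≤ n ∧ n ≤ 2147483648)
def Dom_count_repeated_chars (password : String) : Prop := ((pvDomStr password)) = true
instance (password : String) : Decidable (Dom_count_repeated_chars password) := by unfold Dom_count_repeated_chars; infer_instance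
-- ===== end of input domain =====

-- B replaces A's run-finding two-pointer scan by a run-free local window count
-- (a pair of equal adjacent chars is counted iff it has an equal neighbour pair);
-- objective: alternative.

-- ===== PORT A =====
-- inner while loop: advance j while j < len(password) and password[j] == password[i] (c = password[i])
def pvAInner (p : List Char) (c : Char) (j : Nat) : Nat :=
  if h : j < p.length then
    if p[j] == c then pvAInner p c (j + 1) else j
  else j
termination_by p.length - j

theorem pvAInner_ge (p : List Char) (c : Char) (j : Nat) : j ≤ pvAInner p c j := by
  unfold pvAInner
  split
  · split
    · have := pvAInner_ge p c (j + 1); omega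
    · exact le_refl j
  · exact le_refl j
termination_by p.length - j

theorem pvAInner_gt (p : List Char) (i : Nat) (h : i < p.length) :
    i < pvAInner p (p[i]) i := by
  rw [pvAInner]
  simp only [h, dif_pos, beq_self_eq_true, if_pos]
  have := pvAInner_ge p (p[i]) (i + 1)
  omega

-- outer while loop: count accumulator, i = j after each run
def pvAOuter (p : List Char) (i : Nat) (count : Int) : Int :=
  if h : i < p.length then
    let j := pvAInner p (p[i]) i
    let run := j - i
    pvAOuter p j (if run ≥ 3 then count + ((run : Int) - 1) else count)
  else count
termination_by p.length - i
decreasing_by have := pvAInner_gt p i h; omega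

def count_repeated_chars (password : String) : Int :=
  pvAOuter password.toList 0 0

-- ===== PORT B =====
-- Source B's generator: for i in range(n-1), count i when password[i] == password[i+1]
-- and ((i > 0 and password[i-1] == password[i]) or (i+2 < n and password[i+1] == password[i+2])).
-- Python's indexing is always in range here (each access is guarded), so getD's
-- default is never the decided value; the guards are the same boolean short-circuits.
def pvBPred (l : List Char) (i : Nat) : Bool :=
  (l.getD i ' ' == l.getD (i + 1) ' ') &&
    ((decide (0 < i) && (l.getD (i - 1) ' ' == l.getD i ' ')) ||
     (decide (i + 2 < l.length) && (l.getD (i + 1) ' ' == l.getD (i + 2) ' ')))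

def count_repeated_chars_alt (password : String) : Int :=
  (((List.range (password.toList.length - 1)).countP (pvBPred password.toList) : Nat) : Int)

-- ===== PRECONDITION & SPEC =====
def Spec_count_repeated_chars (password : String) (out : Int) : Prop := out = count_repeated_chars_alt password
instance (password : String) (out : Int) : Decidable (Spec_count_repeated_chars password out) := by unfold Spec_count_repeated_chars; infer_instance

-- ===== CLAIM (what is proved, stated in full; the proofs are below) =====
def Claim_equal_count_repeated_chars : Prop := ∀ (password : String), Dom_count_repeated_chars password → Spec_count_repeated_chars password (count_repeated_chars password)

-- ===== LEMMAS AND PROOFS =====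

-- run-sum characterisation: sum of (run-1) over runs of length >= 3
def pvF : List Char → Int
  | [] => 0
  | c :: t =>
    let k := (t.takeWhile (· == c)).length
    (if k + 1 ≥ 3 then ((k : Int) + 1) - 1 else 0) + pvF (t.drop k)
termination_by l => l.length
decreasing_by simp only [List.length_drop, List.length_cons]; omega

theorem drop_takeWhile_length {α : Type} (l : List α) (pgm : α → Bool) :
    l.drop (l.takeWhile pgm).length = l.dropWhile pgm := by
  induction l with
  | nil => simp
  | cons a t ih =>
    by_cases h : pgm a
    · simp [h, ih]
    · simp [h]

theorem pvF_cons (c : Char) (t : List Char) :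
    pvF (c :: t) =
      (if (t.takeWhile (· == c)).length + 1 ≥ 3
         then ((t.takeWhile (· == c)).length : Int) + 1 - 1 else 0)
        + pvF (t.dropWhile (· == c)) := by
  rw [pvF, drop_takeWhile_length]

theorem pvAInner_eq (p : List Char) (c : Char) (j : Nat) :
    pvAInner p c j = j + ((p.drop j).takeWhile (· == c)).length := by
  rw [pvAInner]
  split
  · rename_i h
    rw [List.drop_eq_getElem_cons h]
    by_cases hc : p[j] == c
    · simp only [hc, if_pos, List.takeWhile_cons, List.length_cons]
      rw [pvAInner_eq p c (j + 1)]
      omega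
    · simp [hc]
  · rename_i h
    have : p.drop j = [] := List.drop_eq_nil_of_le (by omega)
    simp [this]
termination_by p.length - j

theorem pvAOuter_eq (p : List Char) (i : Nat) (count : Int) :
    pvAOuter p i count = count + pvF (p.drop i) := by
  rw [pvAOuter]
  split
  · rename_i h
    have hdrop := List.drop_eq_getElem_cons h
    set k := ((p.drop (i + 1)).takeWhile (· == p[i])).length with hk
    have hinner : pvAInner p (p[i]) i = i + 1 + k := by
      rw [pvAInner_eq, hdrop]
      simp only [List.takeWhile_cons, beq_self_eq_true, if_pos, List.length_cons]
      omega
    have hrn : i + 1 + k - i = k + 1 := by omega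
    show pvAOuter p (pvAInner p p[i] i)
        (if pvAInner p p[i] i - i ≥ 3
           then count + (((pvAInner p p[i] i - i : Nat) : Int) - 1) else count)
        = count + pvF (p.drop i)
    rw [hinner, hrn, pvAOuter_eq p (i + 1 + k)]
    conv_rhs => rw [hdrop, pvF]
    rw [← hk]
    have hdd : p.drop (i + 1 + k) = (p.drop (i + 1)).drop k := by
      rw [List.drop_drop]
    rw [hdd]
    generalize pvF ((p.drop (i + 1)).drop k) = X
    split_ifs <;> omega
  · rename_i h
    have : p.drop i = [] := List.drop_eq_nil_of_le (by omega)
    simp [this, pvF]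
termination_by p.length - i
decreasing_by omega

-- predicate generalised with an explicit "char before the list" (for the shift)
def pvPrevAt (p : Option Char) (l : List Char) (i : Nat) : Option Char :=
  if i = 0 then p else some (l.getD (i - 1) ' ')

def pvQ (p : Option Char) (l : List Char) (i : Nat) : Bool :=
  (l.getD i ' ' == l.getD (i + 1) ' ') &&
    ((pvPrevAt p l i == some (l.getD i ' ')) ||
     (decide (i + 2 < l.length) && (l.getD (i + 1) ' ' == l.getD (i + 2) ' ')))

theorem pvBPred_eq_Q (l : List Char) (i : Nat) : pvBPred l i = pvQ none l i := by
  unfold pvBPred pvQ pvPrevAt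
  by_cases h : i = 0
  · subst h; simp
  · simp [h, Nat.pos_of_ne_zero h]

theorem pvQ_shift (p : Option Char) (a : Char) (t : List Char) (i : Nat) :
    pvQ p (a :: t) (i + 1) = pvQ (some a) t i := by
  unfold pvQ pvPrevAt
  have hd : decide (i + 1 + 2 < (a :: t).length) = decide (i + 2 < t.length) := by
    simp only [List.length_cons, decide_eq_decide]; omega
  by_cases h : i = 0
  · subst h
    simp only [List.getD_cons_succ, hd]
    simp
  · obtain ⟨j, rfl⟩ := Nat.exists_eq_succ_of_ne_zero h
    simp only [List.getD_cons_succ, hd, Nat.add_sub_cancel,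
      Nat.succ_ne_zero, if_neg, Nat.add_eq_zero, and_false, false_and]
    rfl

-- recursive count with prev
def pvG : Option Char → List Char → Int
  | _, [] => 0
  | _, [_] => 0
  | p, a :: b :: t =>
    (if (a == b) && ((p == some a) || (decide (0 < t.length) && (b == t.getD 0 ' '))) then 1 else 0)
      + pvG (some a) (b :: t)

theorem countP_range_succ (n : Nat) (P : Nat → Bool) :
    (List.range (n + 1)).countP P
      = (if P 0 then 1 else 0) + (List.range n).countP (fun i => P (i + 1)) := by
  rw [List.range_succ_eq_map, List.countP_cons, List.countP_map]
  simp only [Function.comp_def, Nat.succ_eq_add_one]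
  split_ifs <;> omega

theorem pvG_eq_count (l : List Char) (p : Option Char) :
    pvG p l = (((List.range (l.length - 1)).countP (pvQ p l) : Nat) : Int) := by
  match l with
  | [] => simp [pvG]
  | [a] => simp [pvG]
  | a :: b :: t =>
    have hlen : (a :: b :: t).length - 1 = t.length + 1 := by simp
    rw [hlen, countP_range_succ]
    have hsh : (fun i => pvQ p (a :: b :: t) (i + 1)) = pvQ (some a) (b :: t) := by
      funext i; exact pvQ_shift p a (b :: t) i
    rw [hsh]
    have h0 : pvQ p (a :: b :: t) 0
        = ((a == b) && ((p == some a) || (decide (0 < t.length) && (b == t.getD 0 ' ')))) := by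
      unfold pvQ pvPrevAt
      have h2 : decide (0 + 2 < (a :: b :: t).length) = decide (0 < t.length) := by
        simp only [List.length_cons, decide_eq_decide]; omega
      rw [h2]
      simp
    rw [pvG, pvG_eq_count (b :: t) (some a), h0]
    have h2 : (b :: t).length - 1 = t.length := by simp
    rw [h2]
    push_cast
    split_ifs <;> omega

theorem pvG_prev_irrel (c : Char) (l : List Char) (h : l.head? ≠ some c) :
    pvG (some c) l = pvG none l := by
  match l with
  | [] => rfl
  | [_] => rfl
  | a :: b :: t =>
    have hac : (some c == some a) = false := by
      simp only [List.head?_cons, ne_eq, Option.some.injEq] at h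
      simp only [beq_eq_false_iff_ne, ne_eq, Option.some.injEq]
      intro hca; exact h hca.symm
    simp only [pvG, hac]
    simp

theorem pvG_run (c : Char) (rest : List Char) (h : rest.head? ≠ some c) :
    (k : Nat) → pvG (some c) (List.replicate k c ++ rest)
      = (if 1 ≤ k then ((k : Int) - 1) else 0) + pvG none rest
  | 0 => by simpa using pvG_prev_irrel c rest h
  | 1 => by
    match rest, h with
    | [], _ => simp [pvG]
    | r :: t, h =>
      have hcr : (c == r) = false := by
        simp only [List.head?_cons, ne_eq, Option.some.injEq] at h
        simp only [beq_eq_false_iff_ne, ne_eq]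
        intro hcr; exact h hcr.symm
      simp only [List.replicate, List.nil_append, List.cons_append, pvG, hcr,
        Bool.false_and, Bool.false_or, if_neg]
      rw [pvG_prev_irrel c (r :: t) h]
      simp
  | (k + 2) => by
    have ih := pvG_run c rest h (k + 1)
    have hstep : List.replicate (k + 2) c ++ rest
        = c :: c :: (List.replicate k c ++ rest) := by
      simp [List.replicate_succ]
    have hcons : c :: (List.replicate k c ++ rest)
        = List.replicate (k + 1) c ++ rest := by
      simp [List.replicate_succ]
    rw [hstep, pvG, hcons, ih]
    simp only [beq_self_eq_true, Bool.true_or, Bool.true_and, if_pos]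
    rw [if_pos (by omega), if_pos (by omega)]
    generalize pvG none rest = X
    push_cast
    ring

theorem takeWhile_eq_replicate (c : Char) (t : List Char) :
    t.takeWhile (· == c) = List.replicate (t.takeWhile (· == c)).length c := by
  rw [List.eq_replicate_iff]
  refine ⟨rfl, ?_⟩
  intro b hb
  have := List.mem_takeWhile_imp hb
  simpa using this

theorem head?_dropWhile_ne (c : Char) (t : List Char) :
    (t.dropWhile (· == c)).head? ≠ some c := by
  induction t with
  | nil => simp
  | cons a u ih =>
    by_cases ha : a == c
    · simpa [List.dropWhile_cons, ha] using ih
    · simp only [List.dropWhile_cons, ha, if_neg, Bool.false_eq_true, not_false_iff,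
        List.head?_cons, ne_eq, Option.some.injEq]
      intro hac
      subst hac
      simp at ha

-- counting a full run: c :: replicate k c is a run of length k+1
theorem pvG_none_run (c : Char) (rest : List Char) (h : rest.head? ≠ some c) :
    (k : Nat) → pvG none (c :: (List.replicate k c ++ rest))
      = (if k + 1 ≥ 3 then (k : Int) else 0) + pvG none rest
  | 0 => by
    match rest, h with
    | [], _ => simp [pvG]
    | r :: t, h =>
      have h' : r ≠ c := by simpa using fun hx : r = c => h (by simp [hx])
      have hcr : (c == r) = false := beq_eq_false_iff_ne.mpr (Ne.symm h')
      simp only [List.replicate, List.nil_append, pvG, hcr, Bool.false_and, if_neg,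
        Bool.false_eq_true, not_false_iff]
      rw [pvG_prev_irrel c (r :: t) h]
      simp
  | 1 => by
    -- list = c :: c :: rest, run of length 2: nothing counted
    have h0 : ((List.replicate 0 c ++ rest).getD 0 ' ' == c) = false ∨ rest.length = 0 := by
      match rest, h with
      | [], _ => right; rfl
      | r :: t, h =>
        left
        simp only [List.replicate, List.nil_append, List.getD_cons_zero]
        have h' : r ≠ c := by simpa using fun hx : r = c => h (by simp [hx])
        exact beq_eq_false_iff_ne.mpr h'
    have : List.replicate 1 c ++ rest = c :: rest := by simp [List.replicate]
    rw [this, pvG]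
    have hcnt : ((c == c) && ((none == some c) ||
        (decide (0 < rest.length) && (rest.getD 0 ' ' == c)))) = false := by
      rcases h0 with h0 | h0
      · simp only [List.replicate, List.nil_append] at h0
        rw [h0]
        simp
      · simp [h0]
    have hcnt' : ((c == c) && ((none == some c) ||
        (decide (0 < rest.length) && (c == rest.getD 0 ' ')))) = false := by
      cases hq : rest.getD 0 ' ' == c
      · cases hq2 : c == rest.getD 0 ' '
        · simp [hq2]
        · exfalso
          have := eq_of_beq hq2
          rw [this] at hq
          simp at hq
      · rw [hq] at hcnt
        simp only [beq_self_eq_true, Bool.true_and] at hcnt ⊢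
        have := eq_of_beq hq
        rw [this]
        simpa using hcnt
    rw [hcnt']
    simp only [Bool.false_eq_true, if_neg, not_false_iff, if_false]
    have : c :: rest = List.replicate 1 c ++ rest := by simp [List.replicate]
    rw [this, pvG_run c rest h 1]
    norm_num
  | (k + 2) => by
    have ih : pvG (some c) (List.replicate (k + 2) c ++ rest)
        = ((k : Int) + 1) + pvG none rest := by
      rw [pvG_run c rest h (k + 2), if_pos (by omega)]
      push_cast; ring
    have hstep : List.replicate (k + 2) c ++ rest
        = c :: (List.replicate (k + 1) c ++ rest) := by
      simp [List.replicate_succ]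
    rw [hstep, pvG]
    have hget : (List.replicate (k + 1) c ++ rest).getD 0 ' ' = c := by
      simp [List.replicate_succ]
    have hlen : 0 < (List.replicate (k + 1) c ++ rest).length := by
      simp [List.replicate_succ]
    rw [← hstep, ih]
    have hcnt : ((c == c) && ((none == some c) ||
        (decide (0 < (List.replicate (k + 1) c ++ rest).length) &&
          (c == (List.replicate (k + 1) c ++ rest).getD 0 ' ')))) = true := by
      simp [hget, hlen]
    rw [hcnt]
    rw [if_pos rfl, if_pos (by omega)]
    push_cast
    ring

theorem pvG_none_eq_pvF (l : List Char) : pvG none l = pvF l := by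
  match l with
  | [] => simp [pvG, pvF]
  | c :: t =>
    have hrest := head?_dropWhile_ne c t
    have hdec : t = List.replicate (t.takeWhile (· == c)).length c ++ t.dropWhile (· == c) := by
      conv_lhs => rw [← List.takeWhile_append_dropWhile (p := (· == c)) (l := t)]
      rw [← takeWhile_eq_replicate]
    have hlt : (t.dropWhile (· == c)).length < (c :: t).length := by
      have := List.length_dropWhile_le (· == c) t
      simp only [List.length_cons]
      omega
    have hrec : pvG none (t.dropWhile (· == c)) = pvF (t.dropWhile (· == c)) :=
      pvG_none_eq_pvF (t.dropWhile (· == c))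
    rw [pvF_cons]
    conv_lhs => rw [show c :: t
        = c :: (List.replicate (t.takeWhile (· == c)).length c ++ t.dropWhile (· == c)) by
      rw [← hdec]]
    rw [pvG_none_run c (t.dropWhile (· == c)) hrest (t.takeWhile (· == c)).length, hrec]
    generalize pvF (t.dropWhile (· == c)) = X
    split_ifs <;> push_cast <;> ring
termination_by l.length
decreasing_by
  have := List.length_dropWhile_le (fun x => x == c) t
  simp only [List.length_cons]
  omega

-- ===== VERDICT (by name: the statement is the Claim_ definition above) =====
theorem count_repeated_chars_spec : Claim_equal_count_repeated_chars := by
  intro password _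
  unfold Spec_count_repeated_chars count_repeated_chars count_repeated_chars_alt
  rw [pvAOuter_eq]
  have hcong : (List.range (password.toList.length - 1)).countP (pvBPred password.toList)
      = (List.range (password.toList.length - 1)).countP (pvQ none password.toList) := by
    apply List.countP_congr
    intro i _
    rw [pvBPred_eq_Q]
  rw [hcong, ← pvG_eq_count, pvG_none_eq_pvF]
  simp
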